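-- pv_equiv track=rewrite | github.com/Niharikagulyani/Tabularise | Split-Model/prepare_data/prepare_data_padding_SpanText.py | get_left_or_above
-- ===== SOURCE A (Python) =====
-- def get_left_or_above(left_list):
--     i = len(left_list)-1
--     while i>0:
--         if left_list[i]-left_list[i-1]==1:
--             i=i-1
--         else:
--             break
--     return left_list[i]
-- ===== SOURCE B (Python) =====
-- def get_left_or_above(left_list):
--     start = 0
--     for i in range(1, len(left_list)):
--         if left_list[i] - left_list[i - 1] != 1:
--             start = i
--     return left_list[start]
-- ===== Notes on version B (the rewrite author's own statement) =====
-- stated objective: alternative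
-- what changed: Replaced the backward walk with early break by a forward single pass that tracks the start index of the final unit-step run (reset on every break in consecutiveness) and indexes once at the end.
import Mathlib
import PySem

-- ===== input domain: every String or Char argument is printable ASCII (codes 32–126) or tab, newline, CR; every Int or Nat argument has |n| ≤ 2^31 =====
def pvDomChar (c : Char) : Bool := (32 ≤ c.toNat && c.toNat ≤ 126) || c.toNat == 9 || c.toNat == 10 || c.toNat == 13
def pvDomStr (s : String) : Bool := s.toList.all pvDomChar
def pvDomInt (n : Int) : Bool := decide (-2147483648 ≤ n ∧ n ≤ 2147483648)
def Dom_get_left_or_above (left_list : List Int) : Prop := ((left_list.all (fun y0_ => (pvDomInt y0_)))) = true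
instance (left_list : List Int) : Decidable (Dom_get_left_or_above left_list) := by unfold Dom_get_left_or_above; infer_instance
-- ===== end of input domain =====

-- B rewrites the backward early-break walk as a forward full scan tracking the start of the last unit-step run (alternative decomposition, same cost).

-- ===== PORT A =====
-- the 'while i>0: if xs[i]-xs[i-1]==1: i=i-1 else: break' loop, recursing on i
def pvALoop (xs : List Int) : Nat → Nat
  | 0 => 0
  | (i+1) =>
      if PySem.List.pyGetD xs ((i : Int) + 1) 0 - PySem.List.pyGetD xs (i : Int) 0 = 1
      then pvALoop xs i
      else i + 1

def get_left_or_above (left_list : List Int) : Int :=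
  PySem.List.pyGetD left_list ((pvALoop left_list (left_list.length - 1) : Nat) : Int) 0

-- ===== PORT B =====
def get_left_or_above_alt (left_list : List Int) : Int :=
  let start : Int :=
    (PySem.List.pyRange 1 left_list.length 1).foldl
      (fun s i =>
        if PySem.List.pyGetD left_list i 0 - PySem.List.pyGetD left_list (i - 1) 0 ≠ 1
        then i else s) 0
  PySem.List.pyGetD left_list start 0

-- ===== PRECONDITION & SPEC =====
-- Pre_ excludes only the empty list, on which both Pythons raise IndexError.
def Pre_get_left_or_above (left_list : List Int) : Prop := left_list ≠ []
instance (left_list : List Int) : Decidable (Pre_get_left_or_above left_list) := by unfold Pre_get_left_or_above; infer_instance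
def pvWitness_get_left_or_above : List Int := [3, 7, 8, 9]

def Spec_get_left_or_above (left_list : List Int) (out : Int) : Prop := out = get_left_or_above_alt left_list
instance (left_list : List Int) (out : Int) : Decidable (Spec_get_left_or_above left_list out) := by unfold Spec_get_left_or_above; infer_instance

-- ===== CLAIM (what is proved, stated in full; the proofs are below) =====
def Claim_equal_get_left_or_above : Prop := ∀ (left_list : List Int), Dom_get_left_or_above left_list → Pre_get_left_or_above left_list → Spec_get_left_or_above left_list (get_left_or_above left_list)

-- ===== LEMMAS AND PROOFS =====

-- the forward fold up to index n+1 computes the same stop index as A's backward walk from n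
theorem pvFold_eq_aLoop (xs : List Int) (n : Nat) :
    (PySem.List.pyRange 1 ((n : Int) + 1) 1).foldl
      (fun s i =>
        if PySem.List.pyGetD xs i 0 - PySem.List.pyGetD xs (i - 1) 0 ≠ 1
        then i else s) 0 = ((pvALoop xs n : Nat) : Int) := by
  induction n with
  | zero => simp [PySem.List.pyRange_one_eq_nil, pvALoop]
  | succ n ih =>
      rw [show ((n + 1 : Nat) : Int) + 1 = ((n : Int) + 1) + 1 by push_cast; ring,
        PySem.List.pyRange_one_succ_right (by omega), List.foldl_append]
      simp only [List.foldl_cons, List.foldl_nil, ih, pvALoop]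
      have h1 : ((n : Int) + 1) - 1 = (n : Int) := by ring
      rw [h1]
      simp

-- ===== VERDICT (by name: the statement is the Claim_ definition above) =====
theorem get_left_or_above_spec : Claim_equal_get_left_or_above := by
  intro xs _ hne
  unfold Spec_get_left_or_above get_left_or_above get_left_or_above_alt
  obtain ⟨n, hn⟩ : ∃ n : Nat, xs.length = n + 1 :=
    ⟨xs.length - 1, by have := List.length_pos_iff.mpr hne; omega⟩
  simp only [hn, Nat.add_sub_cancel]
  rw [show ((n + 1 : Nat) : Int) = (n : Int) + 1 from by push_cast; ring, pvFold_eq_aLoop]
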